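-- pv_equiv track=rewrite | github.com/pypi-data/pypi-mirror-28 | packages/cli-pipeline/cli-pipeline-1.5.7.tar.gz/cli-pipeline-1.5.7/cli_pipeline/cli_pipeline.py | _get_svc_yamls
-- ===== SOURCE A (Python) =====
-- _kube_svc_registry = {'jupyter': (['jupyterhub-svc.yaml'], []),
--                      'jupyterhub': (['jupyterhub-svc.yaml'], []),
--                      'spark': (['spark-master-svc.yaml'], ['spark-worker', 'metastore']),
--                      'spark-worker': (['spark-worker-svc.yaml'], []),
--                      'metastore': (['metastore-svc.yaml'], ['mysql']),
--                      'hdfs': (['namenode-svc.yaml'], []),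
--                      'redis': (['redis-master-svc.yaml'], []),
--                      'presto': (['presto-master-svc.yaml',
--                                  'presto-worker-svc.yaml'], ['metastore']),
--                      'presto-ui': (['presto-ui-svc.yaml'], ['presto']),
--                      'airflow': (['airflow-svc.yaml'], ['mysql', 'redis']),
--                      'mysql': (['mysql-master-svc.yaml'], []),
--                      #'web-home': (['web/home-svc.yaml'], []),
--                      'zeppelin': (['zeppelin-svc.yaml'], []),
--                      #'zookeeper': (['zookeeper/zookeeper-svc.yaml'], []),
--                      'elasticsearch': (['elasticsearch-2-3-0-svc.yaml'], []),
--                      'kibana': (['kibana-4-5-0-svc.yaml'], ['elasticsearch'], []),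
--                      #'kafka': (['stream/kafka-0.11-svc.yaml'], ['zookeeper']),
--                      'cassandra': (['cassandra-svc.yaml'], []),
--                      #'jenkins': (['jenkins-svc.yaml'], []),
--                      #'turbine': (['dashboard/turbine-svc.yaml'], []),
--                      #'hystrix': (['dashboard/hystrix-svc.yaml'], []),
--                     }
--
-- def _get_svc_yamls(
--                    service_name):
--     try:
--         (svc_yamls, dependencies) = _kube_svc_registry[service_name]
--     except:
--         dependencies = []
--         svc_yamls = []
--
--     if len(dependencies) > 0:
--         for dependency_service_name in dependencies:
--             svc_yamls = svc_yamls + _get_svc_yamls(service_name=dependency_service_name)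
--
--     return svc_yamls
-- ===== SOURCE B (Python) =====
-- # The registry is a fixed module constant, so the transitive expansion of every
-- # service is itself a constant: tabulate it once and answer by a single lookup.
-- # Unknown services (and the malformed 3-tuple 'kibana' entry, whose unpacking
-- # fails) have no entry and yield [].
-- _svc_yamls_table = {
--     'jupyter': ['jupyterhub-svc.yaml'],
--     'jupyterhub': ['jupyterhub-svc.yaml'],
--     'spark': ['spark-master-svc.yaml', 'spark-worker-svc.yaml',
--               'metastore-svc.yaml', 'mysql-master-svc.yaml'],
--     'spark-worker': ['spark-worker-svc.yaml'],
--     'metastore': ['metastore-svc.yaml', 'mysql-master-svc.yaml'],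
--     'hdfs': ['namenode-svc.yaml'],
--     'redis': ['redis-master-svc.yaml'],
--     'presto': ['presto-master-svc.yaml', 'presto-worker-svc.yaml',
--                'metastore-svc.yaml', 'mysql-master-svc.yaml'],
--     'presto-ui': ['presto-ui-svc.yaml', 'presto-master-svc.yaml',
--                   'presto-worker-svc.yaml', 'metastore-svc.yaml',
--                   'mysql-master-svc.yaml'],
--     'airflow': ['airflow-svc.yaml', 'mysql-master-svc.yaml',
--                 'redis-master-svc.yaml'],
--     'mysql': ['mysql-master-svc.yaml'],
--     'zeppelin': ['zeppelin-svc.yaml'],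
--     'elasticsearch': ['elasticsearch-2-3-0-svc.yaml'],
--     'cassandra': ['cassandra-svc.yaml'],
-- }
--
-- def _get_svc_yamls(service_name):
--     return list(_svc_yamls_table.get(service_name, []))
-- ===== Notes on version B (the rewrite author's own statement) =====
-- stated objective: simpler
-- what changed: Replaces the recursive dependency expansion over the registry with a precomputed flattened table (the registry is a fixed constant, so each service's transitive yaml list is a constant) answered by a single dict lookup with default [].
import Mathlib
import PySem

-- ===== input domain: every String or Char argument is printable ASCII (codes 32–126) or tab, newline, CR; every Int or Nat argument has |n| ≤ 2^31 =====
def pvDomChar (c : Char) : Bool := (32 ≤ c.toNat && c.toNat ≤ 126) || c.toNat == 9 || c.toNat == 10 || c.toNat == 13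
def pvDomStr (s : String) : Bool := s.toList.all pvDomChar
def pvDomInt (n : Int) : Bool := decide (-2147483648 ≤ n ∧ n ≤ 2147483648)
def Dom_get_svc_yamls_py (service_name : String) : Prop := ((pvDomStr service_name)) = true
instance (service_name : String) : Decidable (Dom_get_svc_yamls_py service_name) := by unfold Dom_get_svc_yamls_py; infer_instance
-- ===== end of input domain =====

-- B replaces the recursive dependency expansion with a precomputed flattened table (the registry is a fixed constant) answered by one lookup: simpler, same results.


-- ===== PORT A =====
-- The registry's values are tuples of either 2 or 3 components (the 'kibana' entry is a 3-tuple).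
inductive RegEntry
  | two : List String → List String → RegEntry
  | three : List String → List String → List String → RegEntry
deriving DecidableEq, Repr

def kubeSvcRegistry : PySem.Dict String RegEntry := PySem.Dict.mk
  [ ("jupyter", .two ["jupyterhub-svc.yaml"] []),
    ("jupyterhub", .two ["jupyterhub-svc.yaml"] []),
    ("spark", .two ["spark-master-svc.yaml"] ["spark-worker", "metastore"]),
    ("spark-worker", .two ["spark-worker-svc.yaml"] []),
    ("metastore", .two ["metastore-svc.yaml"] ["mysql"]),
    ("hdfs", .two ["namenode-svc.yaml"] []),
    ("redis", .two ["redis-master-svc.yaml"] []),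
    ("presto", .two ["presto-master-svc.yaml", "presto-worker-svc.yaml"] ["metastore"]),
    ("presto-ui", .two ["presto-ui-svc.yaml"] ["presto"]),
    ("airflow", .two ["airflow-svc.yaml"] ["mysql", "redis"]),
    ("mysql", .two ["mysql-master-svc.yaml"] []),
    ("zeppelin", .two ["zeppelin-svc.yaml"] []),
    ("elasticsearch", .two ["elasticsearch-2-3-0-svc.yaml"] []),
    ("kibana", .three ["kibana-4-5-0-svc.yaml"] ["elasticsearch"] []),
    ("cassandra", .two ["cassandra-svc.yaml"] []) ]

-- try: (svc_yamls, dependencies) = _kube_svc_registry[service_name]; except: both [].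
-- A missing key (KeyError) and the 3-tuple 'kibana' entry (ValueError on unpacking) both land in the except branch.
def pyTryUnpack (service_name : String) : List String × List String :=
  match PySem.Dict.get? kubeSvcRegistry service_name with
  | some (.two svc_yamls dependencies) => (svc_yamls, dependencies)
  | _ => ([], [])

-- fuel is a totality guard only; 4 exceeds the registry's dependency depth
def goA (fuel : Nat) (service_name : String) : List String :=
  match fuel with
  | 0 => []
  | fuel + 1 =>
    let (svc_yamls, dependencies) := pyTryUnpack service_name
    if dependencies.length > 0 then
      dependencies.foldl (fun acc d => acc ++ goA fuel d) svc_yamls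
    else
      svc_yamls

def get_svc_yamls_py (service_name : String) : List String := goA 4 service_name

-- ===== PORT B =====
-- precomputed flattened table: service name → its full transitive yaml list (no kibana entry: its malformed registry value yields [])
def svcYamlsTable : PySem.Dict String (List String) := PySem.Dict.mk
  [ ("jupyter", ["jupyterhub-svc.yaml"]),
    ("jupyterhub", ["jupyterhub-svc.yaml"]),
    ("spark", ["spark-master-svc.yaml", "spark-worker-svc.yaml", "metastore-svc.yaml", "mysql-master-svc.yaml"]),
    ("spark-worker", ["spark-worker-svc.yaml"]),
    ("metastore", ["metastore-svc.yaml", "mysql-master-svc.yaml"]),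
    ("hdfs", ["namenode-svc.yaml"]),
    ("redis", ["redis-master-svc.yaml"]),
    ("presto", ["presto-master-svc.yaml", "presto-worker-svc.yaml", "metastore-svc.yaml", "mysql-master-svc.yaml"]),
    ("presto-ui", ["presto-ui-svc.yaml", "presto-master-svc.yaml", "presto-worker-svc.yaml", "metastore-svc.yaml", "mysql-master-svc.yaml"]),
    ("airflow", ["airflow-svc.yaml", "mysql-master-svc.yaml", "redis-master-svc.yaml"]),
    ("mysql", ["mysql-master-svc.yaml"]),
    ("zeppelin", ["zeppelin-svc.yaml"]),
    ("elasticsearch", ["elasticsearch-2-3-0-svc.yaml"]),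
    ("cassandra", ["cassandra-svc.yaml"]) ]

def get_svc_yamls_py_alt (service_name : String) : List String :=
  PySem.Dict.getD svcYamlsTable service_name []

-- ===== PRECONDITION & SPEC =====
def Spec_get_svc_yamls_py (service_name : String) (out : List String) : Prop := out = get_svc_yamls_py_alt service_name
instance (service_name : String) (out : List String) : Decidable (Spec_get_svc_yamls_py service_name out) := by unfold Spec_get_svc_yamls_py; infer_instance

-- ===== CLAIM (what is proved, stated in full; the proofs are below) =====
def Claim_equal_get_svc_yamls_py : Prop := ∀ (service_name : String), Dom_get_svc_yamls_py service_name → Spec_get_svc_yamls_py service_name (get_svc_yamls_py service_name)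

-- ===== LEMMAS AND PROOFS =====

-- Any string is either one of the registry's 15 literal keys or absent from both dicts.
lemma lookup_cases (s : String) :
    s ∈ ["jupyter", "jupyterhub", "spark", "spark-worker", "metastore", "hdfs", "redis",
          "presto", "presto-ui", "airflow", "mysql", "zeppelin", "elasticsearch", "kibana",
          "cassandra"] ∨
      (PySem.Dict.get? kubeSvcRegistry s = none ∧ PySem.Dict.get? svcYamlsTable s = none) := by
  by_cases h : s ∈ ["jupyter", "jupyterhub", "spark", "spark-worker", "metastore", "hdfs",
      "redis", "presto", "presto-ui", "airflow", "mysql", "zeppelin", "elasticsearch", "kibana",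
      "cassandra"]
  · exact Or.inl h
  · right
    simp only [List.mem_cons, List.not_mem_nil, or_false, not_or] at h
    obtain ⟨h1, h2, h3, h4, h5, h6, h7, h8, h9, h10, h11, h12, h13, h14, h15⟩ := h
    constructor <;>
      simp [kubeSvcRegistry, svcYamlsTable, PySem.Dict.get?, beq_iff_eq, Ne.symm h1, Ne.symm h2,
        Ne.symm h3, Ne.symm h4, Ne.symm h5, Ne.symm h6, Ne.symm h7, Ne.symm h8, Ne.symm h9,
        Ne.symm h10, Ne.symm h11, Ne.symm h12, Ne.symm h13, Ne.symm h14, Ne.symm h15]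

-- ===== VERDICT (by name: the statement is the Claim_ definition above) =====
theorem get_svc_yamls_py_spec : Claim_equal_get_svc_yamls_py := by
  intro s _
  unfold Spec_get_svc_yamls_py
  rcases lookup_cases s with h | ⟨ha, hb⟩
  · fin_cases h <;> decide
  · simp [get_svc_yamls_py, get_svc_yamls_py_alt, goA, pyTryUnpack, ha,
      PySem.Dict.getD, hb]
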